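-- pv_equiv track=rewrite | github.com/xenova/ChatReplayDownloader | chat_replay_downloader/sites/common.py | must_add_item
-- ===== SOURCE A (Python) =====
-- def must_add_item(item, message_groups_dict, messages_groups_to_add, messages_types_to_add):
--     if 'all' in messages_groups_to_add:  # user wants everything
--         return True
--
--     valid_message_types = []
--     for message_group in messages_groups_to_add or []:
--         valid_message_types += message_groups_dict.get(message_group, [])
--
--     for message_type in messages_types_to_add or []:
--         valid_message_types.append(message_type)
--
--     return item.get('message_type') in valid_message_types
-- ===== SOURCE B (Python) =====
-- def must_add_item(item, message_groups_dict, messages_groups_to_add, messages_types_to_add):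
--     if 'all' in messages_groups_to_add:  # user wants everything
--         return True
--     mt = item.get('message_type')
--     if mt in (messages_types_to_add or []):
--         return True
--     selected = set(messages_groups_to_add or [])
--     return any(group in selected and mt in types
--                for group, types in message_groups_dict.items())
-- ===== Notes on version B (the rewrite author's own statement) =====
-- stated objective: alternative
-- what changed: Inverts the traversal: instead of looking up each selected group in the dict and concatenating all their type lists into one union list to test at the end, B builds a set of the selected group names once and makes a single short-circuiting pass over the dict's own items, accepting as soon as an entry whose key is selected contains the message type (explicit types are checked first).
import Mathlib
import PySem

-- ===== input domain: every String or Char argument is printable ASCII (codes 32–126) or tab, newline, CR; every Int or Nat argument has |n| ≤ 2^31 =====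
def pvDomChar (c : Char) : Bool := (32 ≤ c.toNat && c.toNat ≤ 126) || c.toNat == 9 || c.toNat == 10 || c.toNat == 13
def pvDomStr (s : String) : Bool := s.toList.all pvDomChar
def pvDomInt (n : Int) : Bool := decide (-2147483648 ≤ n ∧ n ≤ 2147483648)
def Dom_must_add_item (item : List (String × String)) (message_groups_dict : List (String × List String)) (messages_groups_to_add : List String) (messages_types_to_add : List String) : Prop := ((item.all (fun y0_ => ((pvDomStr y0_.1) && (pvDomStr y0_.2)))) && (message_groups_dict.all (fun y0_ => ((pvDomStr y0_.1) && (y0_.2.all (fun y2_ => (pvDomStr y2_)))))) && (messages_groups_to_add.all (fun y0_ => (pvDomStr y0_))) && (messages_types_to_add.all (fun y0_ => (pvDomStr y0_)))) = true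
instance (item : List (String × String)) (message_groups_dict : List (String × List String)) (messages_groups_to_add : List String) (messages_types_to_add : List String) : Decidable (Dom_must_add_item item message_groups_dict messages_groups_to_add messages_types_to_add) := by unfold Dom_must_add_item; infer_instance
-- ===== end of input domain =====

-- ===== PORT A =====
-- B inverts the traversal: a set of the selected group names and ONE pass over the dict's
-- own entries, instead of A's union list built by per-group lookups; objective: alternative.
def must_add_item (item : List (String × String)) (message_groups_dict : List (String × List String)) (messages_groups_to_add : List String) (messages_types_to_add : List String) : Bool :=
  if messages_groups_to_add.contains "all" then true
  else
    -- valid_message_types built by iterating the groups, then appending the explicit types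
    let valid1 : List String := messages_groups_to_add.foldl
      (fun acc g => acc ++ PySem.Dict.getD (PySem.Dict.mk message_groups_dict) g []) []
    let valid : List String := messages_types_to_add.foldl (fun acc t => acc ++ [t]) valid1
    -- item.get('message_type') may be None; a None never equals a string in the list
    valid.any (fun t => PySem.Dict.get? (PySem.Dict.mk item) "message_type" == some t)

-- ===== PORT B =====
def must_add_item_alt (item : List (String × String)) (message_groups_dict : List (String × List String)) (messages_groups_to_add : List String) (messages_types_to_add : List String) : Bool :=
  if messages_groups_to_add.contains "all" then true
  else
    let mt := PySem.Dict.get? (PySem.Dict.mk item) "message_type"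
    if messages_types_to_add.any (fun t => mt == some t) then true
    else
      let selected : PySem.Set String := PySem.Set.ofList messages_groups_to_add
      -- one pass over the dict's items: 'any(group in selected and mt in types …)'
      (PySem.Dict.items (PySem.Dict.mk message_groups_dict)).any
        (fun p => PySem.Set.contains selected p.1 && p.2.any (fun t => mt == some t))

-- ===== PRECONDITION & SPEC =====
-- Pre_ excludes association lists whose keys repeat: a Python dict cannot hold duplicate
-- keys, so such lists do not encode any input the Python programs can receive.
def Pre_must_add_item (item : List (String × String)) (message_groups_dict : List (String × List String)) (messages_groups_to_add : List String) (messages_types_to_add : List String) : Prop :=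
  (message_groups_dict.map Prod.fst).Nodup
instance (item : List (String × String)) (message_groups_dict : List (String × List String)) (messages_groups_to_add : List String) (messages_types_to_add : List String) : Decidable (Pre_must_add_item item message_groups_dict messages_groups_to_add messages_types_to_add) := by unfold Pre_must_add_item; infer_instance
def pvWitness_must_add_item : (List (String × String)) × (List (String × List String)) × List String × List String :=
  ([("message_type", "text")], [("a", ["text"]), ("b", ["super"])], ["a"], [])
def Spec_must_add_item (item : List (String × String)) (message_groups_dict : List (String × List String)) (messages_groups_to_add : List String) (messages_types_to_add : List String) (out : Bool) : Prop := out = must_add_item_alt item message_groups_dict messages_groups_to_add messages_types_to_add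
instance (item : List (String × String)) (message_groups_dict : List (String × List String)) (messages_groups_to_add : List String) (messages_types_to_add : List String) (out : Bool) : Decidable (Spec_must_add_item item message_groups_dict messages_groups_to_add messages_types_to_add out) := by unfold Spec_must_add_item; infer_instance

-- ===== CLAIM (what is proved, stated in full; the proofs are below) =====
def Claim_equal_must_add_item : Prop := ∀ (item : List (String × String)) (message_groups_dict : List (String × List String)) (messages_groups_to_add : List String) (messages_types_to_add : List String), Dom_must_add_item item message_groups_dict messages_groups_to_add messages_types_to_add → Pre_must_add_item item message_groups_dict messages_groups_to_add messages_types_to_add → Spec_must_add_item item message_groups_dict messages_groups_to_add messages_types_to_add (must_add_item item message_groups_dict messages_groups_to_add messages_types_to_add)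

-- ===== LEMMAS AND PROOFS =====

-- any over a foldl that appends lists = any of the accumulator or any group's list
theorem any_foldl_append {α β : Type} (f : α → Bool) (g : β → List α) :
    ∀ (xs : List β) (init : List α),
      (xs.foldl (fun acc x => acc ++ g x) init).any f
        = (init.any f || xs.any (fun x => (g x).any f)) := by
  intro xs
  induction xs with
  | nil => intro init; simp
  | cons x xs ih =>
      intro init
      simp only [List.foldl_cons, ih, List.any_cons, List.any_append]
      cases init.any f <;> cases (g x).any f <;> simp

-- Python's 'if cond: return True' pattern as a boolean or
theorem if_bool_or (x y : Bool) : (if x = true then true else y) = (x || y) := by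
  cases x <;> simp

-- per-selected-group lookup in a dict with distinct keys = one scan of the dict's items
theorem any_getD_eq_any_items (mgd : List (String × List String)) (mga : List String)
    (f : String → Bool) (hnd : (PySem.Dict.mk mgd).keys.Nodup) :
    mga.any (fun g => (PySem.Dict.getD (PySem.Dict.mk mgd) g []).any f)
      = (PySem.Dict.items (PySem.Dict.mk mgd)).any
          (fun p => PySem.Set.contains (PySem.Set.ofList mga) p.1 && p.2.any f) := by
  rw [Bool.eq_iff_iff]
  simp only [List.any_eq_true, Bool.and_eq_true, PySem.Set.contains_iff, PySem.Set.mem_ofList]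
  constructor
  · rintro ⟨g, hg, t, ht, hft⟩
    rw [PySem.Dict.getD_eq_get?_getD] at ht
    cases hget : PySem.Dict.get? (PySem.Dict.mk mgd) g with
    | none => rw [hget] at ht; simp at ht
    | some v =>
        rw [hget] at ht
        refine ⟨(g, v), ?_, hg, t, ht, hft⟩
        exact ((PySem.Dict.get?_eq_some_iff_mem_items _ g v hnd).mp hget)
  · rintro ⟨⟨k, v⟩, hmem, hk, t, ht, hft⟩
    refine ⟨k, hk, t, ?_, hft⟩
    rw [PySem.Dict.getD_of_mem_items (PySem.Dict.mk mgd) hmem hnd []]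
    exact ht

-- ===== VERDICT (by name: the statement is the Claim_ definition above) =====
theorem must_add_item_spec : Claim_equal_must_add_item := by
  intro item mgd mga mta _ hpre
  unfold Spec_must_add_item must_add_item must_add_item_alt
  by_cases hc : mga.contains "all" = true
  · rw [if_pos hc, if_pos hc]
  · dsimp only
    rw [if_neg hc, if_neg hc,
      PySem.List.foldl_append_singleton, List.any_append, any_foldl_append, if_bool_or,
      any_getD_eq_any_items mgd mga _ hpre]
    simp only [List.any_nil, Bool.false_or]
    exact Bool.or_comm _ _
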